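-- pv_equiv track=rewrite | github.com/imaonirvana/poChecker | output_writer/output_writer.py | get_translated_text_range
-- ===== SOURCE A (Python) =====
-- def get_translated_text_range(lines: list[str], line_num: int) -> (int, int):
--     start = -1
--     end = -1
--
--     for i in range(line_num - 1, len(lines)):
--         line = lines[i]
--
--         if line.strip().startswith('msgstr'):
--             start = i
--
--         if line.strip() == "" and start != -1:
--             end = i - 1
--             break
--
--     if start != -1 and end == -1:
--         end = len(lines) - 1
--
--     return start, end
--
--     pass
-- ===== SOURCE B (Python) =====
-- def get_translated_text_range(lines: list[str], line_num: int) -> (int, int):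
--     n = len(lines)
--     base = line_num - 1
--     # first msgstr line at or after base
--     m0 = next((i for i in range(base, n) if lines[i].strip().startswith('msgstr')), None)
--     if m0 is None:
--         return -1, -1
--     # first blank line after it terminates the block; otherwise it runs to the end
--     b = next((i for i in range(m0 + 1, n) if lines[i].strip() == ""), n)
--     start = max(i for i in range(m0, b) if lines[i].strip().startswith('msgstr'))
--     return start, b - 1
-- ===== Notes on version B (the rewrite author's own statement) =====
-- stated objective: alternative
-- what changed: A's single stateful loop (running start, break flag, post-loop end fixup) is replaced by a three-step decomposition: find the first msgstr line, find the first blank line after it (or the list end), then take the last msgstr index before that blank.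
-- outside the precondition, e.g. on get_translated_text_range(['', 'msgstr a'], 0): A returns (1, 1), B returns (-1, -1); on get_translated_text_range([], 0): A raises IndexError, B raises IndexError
import Mathlib
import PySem

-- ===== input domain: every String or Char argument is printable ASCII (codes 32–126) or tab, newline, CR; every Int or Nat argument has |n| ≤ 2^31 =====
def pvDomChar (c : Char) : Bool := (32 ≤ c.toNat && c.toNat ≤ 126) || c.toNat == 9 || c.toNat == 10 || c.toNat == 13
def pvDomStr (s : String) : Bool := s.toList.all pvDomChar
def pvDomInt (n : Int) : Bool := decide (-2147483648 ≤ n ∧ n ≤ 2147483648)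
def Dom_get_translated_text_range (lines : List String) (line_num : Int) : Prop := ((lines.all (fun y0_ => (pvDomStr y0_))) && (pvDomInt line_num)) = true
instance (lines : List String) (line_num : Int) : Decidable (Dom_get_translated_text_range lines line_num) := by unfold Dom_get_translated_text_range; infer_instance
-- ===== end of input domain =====

-- B replaces A's single stateful loop by three separate scans (first msgstr, first blank after it, last msgstr before the blank): a different decomposition, same cost.


-- ===== PORT A =====
-- the for-loop with its running (start, end) state and break; returns end = -1 on fall-through
def gtrLoopA (lines : List String) : List Int → Int → Int × Int
  | [], start => (start, -1)
  | i :: rest, start =>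
    let line := PySem.List.pyGetD lines i ""
    let start1 := if PySem.Str.startswith (PySem.Str.strip line) "msgstr" then i else start
    if PySem.Str.strip line == "" && start1 != -1 then (start1, i - 1)
    else gtrLoopA lines rest start1

def get_translated_text_range (lines : List String) (line_num : Int) : Int × Int :=
  let r := gtrLoopA lines (PySem.List.pyRange (line_num - 1) (lines.length : Int) 1) (-1)
  if r.1 != -1 && r.2 == -1 then (r.1, (lines.length : Int) - 1) else r

-- ===== PORT B =====
def altMsg (lines : List String) (i : Int) : Bool :=
  PySem.Str.startswith (PySem.Str.strip (PySem.List.pyGetD lines i "")) "msgstr"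
def altBlank (lines : List String) (i : Int) : Bool :=
  PySem.Str.strip (PySem.List.pyGetD lines i "") == ""

-- Source B: first msgstr line, then first blank after it (default n), then last msgstr before the blank.
-- Python's max(nonempty generator) is ported as PySem.List.max? with an unreachable default.
def get_translated_text_range_alt (lines : List String) (line_num : Int) : Int × Int :=
  let n : Int := lines.length
  match (PySem.List.pyRange (line_num - 1) n 1).find? (altMsg lines) with
  | none => (-1, -1)
  | some m0 =>
    let b := ((PySem.List.pyRange (m0 + 1) n 1).find? (altBlank lines)).getD n
    let start := (PySem.List.max? ((PySem.List.pyRange m0 b 1).filter (altMsg lines)) (fun x => x)).getD m0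
    (start, b - 1)

-- ===== PRECONDITION & SPEC =====
-- Pre_ restricts to the natural domain of 1-based line numbers: for line_num ≤ 0 A's range start is
-- negative, so A either raises IndexError (index below -len) or accidentally wrap-indexes from the
-- end of the list, which is an artefact of Python's negative indexing, not intended behaviour.
def Pre_get_translated_text_range (lines : List String) (line_num : Int) : Prop := 1 ≤ line_num
instance (lines : List String) (line_num : Int) : Decidable (Pre_get_translated_text_range lines line_num) := by unfold Pre_get_translated_text_range; infer_instance
def pvWitness_get_translated_text_range : List String × Int := (["msgid \"a\"", "msgstr \"b\"", "", "msgid \"c\""], 1)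

def Spec_get_translated_text_range (lines : List String) (line_num : Int) (out : Int × Int) : Prop := out = get_translated_text_range_alt lines line_num
instance (lines : List String) (line_num : Int) (out : Int × Int) : Decidable (Spec_get_translated_text_range lines line_num out) := by unfold Spec_get_translated_text_range; infer_instance

-- ===== CLAIM (what is proved, stated in full; the proofs are below) =====
def Claim_equal_get_translated_text_range : Prop := ∀ (lines : List String) (line_num : Int), Dom_get_translated_text_range lines line_num → Pre_get_translated_text_range lines line_num → Spec_get_translated_text_range lines line_num (get_translated_text_range lines line_num)

-- ===== LEMMAS AND PROOFS =====

-- one step of A's loop, phrased with B's predicates (definitionally equal)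
lemma gtrLoopA_cons (lines : List String) (i : Int) (rest : List Int) (start : Int) :
    gtrLoopA lines (i :: rest) start =
      if altBlank lines i && (if altMsg lines i then i else start) != -1
      then ((if altMsg lines i then i else start), i - 1)
      else gtrLoopA lines rest (if altMsg lines i then i else start) := rfl

-- a blank line never starts with "msgstr"
lemma blank_not_msg (lines : List String) (i : Int) (h : altBlank lines i = true) :
    altMsg lines i = false := by
  unfold altBlank at h
  unfold altMsg
  have he : PySem.Str.strip (PySem.List.pyGetD lines i "") = "" := by
    simpa using h
  rw [he]
  decide

lemma msg_not_blank (lines : List String) (i : Int) (h : altMsg lines i = true) :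
    altBlank lines i = false := by
  cases hq : altBlank lines i with
  | false => rfl
  | true => rw [blank_not_msg lines i hq] at h; exact absurd h (by simp)

-- phase 2: once a msgstr has been seen (start = s >= 0, s < a), A's loop returns the running max of
-- msgstr indices before the first blank, and end = (first blank) - 1, or -1 on fall-through
lemma loopA_phase2 (lines : List String) (n : Int) :
    ∀ (k : Nat) (a s : Int), (n - a).toNat = k → 0 ≤ s → s < a →
    gtrLoopA lines (PySem.List.pyRange a n 1) s =
      match (PySem.List.pyRange a n 1).find? (altBlank lines) with
      | none => (((PySem.List.pyRange a n 1).filter (altMsg lines)).foldl max s, -1)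
      | some b => (((PySem.List.pyRange a b 1).filter (altMsg lines)).foldl max s, b - 1) := by
  intro k
  induction k with
  | zero =>
    intro a s hk hs hsa
    have hba : n ≤ a := by omega
    rw [PySem.List.pyRange_one_eq_nil hba]
    simp [gtrLoopA]
  | succ k ih =>
    intro a s hk hs hsa
    have han : a < n := by omega
    rw [PySem.List.pyRange_one_cons han, gtrLoopA_cons]
    cases hq : altBlank lines a with
    | true =>
      have hp : altMsg lines a = false := blank_not_msg lines a hq
      have hs' : s ≠ -1 := by omega
      rw [List.find?_cons_of_pos hq]
      simp [hp, PySem.List.pyRange_one_eq_nil (le_refl a), hs']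
    | false =>
      have hstep := ih (a + 1) (if altMsg lines a then a else s) (by omega)
        (by split_ifs <;> omega) (by split_ifs <;> omega)
      rw [List.find?_cons_of_neg (by simp [hq])]
      simp only [Bool.false_and, Bool.false_eq_true, if_false]
      rw [hstep]
      cases hfb : (PySem.List.pyRange (a + 1) n 1).find? (altBlank lines) with
      | none =>
        simp only [List.filter_cons]
        cases hp : altMsg lines a with
        | true =>
          simp [List.foldl_cons, max_eq_right (le_of_lt hsa)]
        | false =>
          simp
      | some b =>
        have hbmem : b ∈ PySem.List.pyRange (a + 1) n 1 := List.mem_of_find?_eq_some hfb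
        have hab : a < b := by
          have := (PySem.List.mem_pyRange_one).mp hbmem
          omega
        cases hp : altMsg lines a with
        | true =>
          simp [PySem.List.pyRange_one_cons hab, hp, List.foldl_cons,
            max_eq_right (le_of_lt hsa)]
        | false =>
          simp [PySem.List.pyRange_one_cons hab, hp]

-- phase 1: A's loop from start = -1
lemma loopA_phase1 (lines : List String) (n : Int) :
    ∀ (k : Nat) (a : Int), (n - a).toNat = k → 0 ≤ a →
    gtrLoopA lines (PySem.List.pyRange a n 1) (-1) =
      match (PySem.List.pyRange a n 1).find? (altMsg lines) with
      | none => (-1, -1)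
      | some m0 =>
        match (PySem.List.pyRange (m0 + 1) n 1).find? (altBlank lines) with
        | none => (((PySem.List.pyRange (m0 + 1) n 1).filter (altMsg lines)).foldl max m0, -1)
        | some b => (((PySem.List.pyRange (m0 + 1) b 1).filter (altMsg lines)).foldl max m0, b - 1) := by
  intro k
  induction k with
  | zero =>
    intro a hk ha
    have hba : n ≤ a := by omega
    rw [PySem.List.pyRange_one_eq_nil hba]
    simp [gtrLoopA]
  | succ k ih =>
    intro a hk ha
    have han : a < n := by omega
    rw [PySem.List.pyRange_one_cons han, gtrLoopA_cons]
    cases hp : altMsg lines a with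
    | true =>
      have hq : altBlank lines a = false := msg_not_blank lines a hp
      rw [List.find?_cons_of_pos hp]
      simp only [hq, Bool.false_and, Bool.false_eq_true, if_false]
      exact loopA_phase2 lines n k (a + 1) a (by omega) ha (by omega)
    | false =>
      rw [List.find?_cons_of_neg (by simp [hp])]
      simp only [Bool.false_eq_true, if_false]
      cases hq : altBlank lines a with
      | true =>
        simp only [Bool.true_and]
        have : ((-1 : Int) != -1) = false := by simp
        rw [this]
        simp only [Bool.false_eq_true, if_false]
        exact ih (a + 1) (by omega) (by omega)
      | false =>
        simp only [Bool.false_and, Bool.false_eq_true, if_false]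
        exact ih (a + 1) (by omega) (by omega)

-- ===== VERDICT (by name: the statement is the Claim_ definition above) =====
theorem get_translated_text_range_spec : Claim_equal_get_translated_text_range := by
  intro lines line_num _hdom hpre
  unfold Spec_get_translated_text_range
  unfold Pre_get_translated_text_range at hpre
  unfold get_translated_text_range get_translated_text_range_alt
  dsimp only
  have h1 := loopA_phase1 lines (lines.length : Int)
    (((lines.length : Int) - (line_num - 1)).toNat) (line_num - 1) rfl (by omega)
  rw [h1]
  cases hm : (PySem.List.pyRange (line_num - 1) (lines.length : Int) 1).find? (altMsg lines) with
  | none => simp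
  | some m0 =>
    have hmem := List.mem_of_find?_eq_some hm
    have hm0 : line_num - 1 ≤ m0 ∧ m0 < (lines.length : Int) :=
      (PySem.List.mem_pyRange_one).mp hmem
    have hPm0 : altMsg lines m0 = true := List.find?_some hm
    cases hb : (PySem.List.pyRange (m0 + 1) (lines.length : Int) 1).find? (altBlank lines) with
    | none =>
      have hsplit : PySem.List.pyRange m0 (lines.length : Int) 1 =
          m0 :: PySem.List.pyRange (m0 + 1) (lines.length : Int) 1 :=
        PySem.List.pyRange_one_cons hm0.2
      have hle : m0 ≤ (((PySem.List.pyRange (m0 + 1) (lines.length : Int) 1).filter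
          (altMsg lines)).foldl max m0) := (PySem.List.le_foldl_max _ _).1
      have hne : (((PySem.List.pyRange (m0 + 1) (lines.length : Int) 1).filter
          (altMsg lines)).foldl max m0) ≠ -1 := by omega
      simp only [hb]
      simp [hsplit, hPm0, PySem.List.max?_id_cons, hne]
    | some b =>
      have hbmem := List.mem_of_find?_eq_some hb
      have hbr : m0 + 1 ≤ b ∧ b < (lines.length : Int) :=
        (PySem.List.mem_pyRange_one).mp hbmem
      have hsplit : PySem.List.pyRange m0 b 1 = m0 :: PySem.List.pyRange (m0 + 1) b 1 :=
        PySem.List.pyRange_one_cons (by omega)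
      have hne2 : (b - 1 : Int) ≠ -1 := by omega
      simp only [hb]
      simp [hsplit, hPm0, PySem.List.max?_id_cons, hne2]
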